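-- pv_equiv track=rewrite | github.com/vishesh9131/emitrr_assign | utils/summarization.py | split_by_speaker
-- ===== SOURCE A (Python) =====
-- def split_by_speaker(transcript):
--     """Split transcript by speaker (doctor/patient)"""
--     doctor_text = []
--     patient_text = []
--
--     lines = transcript.split('\n')
--     for line in lines:
--         if line.startswith("Doctor:"):
--             doctor_text.append(line.replace("Doctor:", "").strip())
--         elif line.startswith("Patient:"):
--             patient_text.append(line.replace("Patient:", "").strip())
--
--     return {
--         "doctor": " ".join(doctor_text),
--         "patient": " ".join(patient_text),
--         "full": transcript
--     }
-- ===== SOURCE B (Python) =====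
-- def split_by_speaker(transcript):
--     """Split transcript by speaker (doctor/patient)"""
--     # Build each speaker's joined text directly, back-to-front: no piece
--     # lists, no join; None marks "no line of that speaker seen yet".
--     d = None
--     p = None
--     for line in reversed(transcript.split('\n')):
--         if line.startswith("Doctor:"):
--             s = line.replace("Doctor:", "").strip()
--             d = s if d is None else s + " " + d
--         elif line.startswith("Patient:"):
--             s = line.replace("Patient:", "").strip()
--             p = s if p is None else s + " " + p
--     return {
--         "doctor": "" if d is None else d,
--         "patient": "" if p is None else p,
--         "full": transcript,
--     }
-- ===== Notes on version B (the rewrite author's own statement) =====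
-- stated objective: alternative
-- what changed: Replaces A's iterative accumulate-into-two-lists-then-join scheme by a structural recursion over the lines that builds the two joined speaker strings directly back-to-front (Optional strings with explicit separator insertion), eliminating the intermediate piece lists and the join step.
import Mathlib
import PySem

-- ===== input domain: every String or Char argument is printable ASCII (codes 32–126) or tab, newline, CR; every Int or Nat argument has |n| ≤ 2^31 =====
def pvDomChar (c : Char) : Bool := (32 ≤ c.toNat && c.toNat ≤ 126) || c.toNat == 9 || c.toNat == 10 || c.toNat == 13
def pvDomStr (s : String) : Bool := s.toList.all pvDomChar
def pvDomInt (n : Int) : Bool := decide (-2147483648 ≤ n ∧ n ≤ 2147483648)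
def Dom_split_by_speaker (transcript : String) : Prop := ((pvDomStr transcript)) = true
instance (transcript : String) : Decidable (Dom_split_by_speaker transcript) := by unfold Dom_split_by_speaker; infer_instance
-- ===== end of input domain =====

-- B replaces A's accumulate-into-two-lists-then-join scheme by a single back-to-front pass
-- that builds each speaker's joined string directly (Option accumulators, no piece lists,
-- no join); objective: alternative decomposition, same cost.

-- ===== PORT A =====
def split_by_speaker (transcript : String) : List (String × String) :=
  let lines := (PySem.Str.split? transcript "\n").getD []
  let acc := lines.foldl
    (fun (acc : List String × List String) line =>
      if PySem.Str.startswith line "Doctor:" then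
        (acc.1 ++ [PySem.Str.strip (PySem.Str.replace line "Doctor:" "")], acc.2)
      else if PySem.Str.startswith line "Patient:" then
        (acc.1, acc.2 ++ [PySem.Str.strip (PySem.Str.replace line "Patient:" "")])
      else acc)
    ([], [])
  [("doctor", PySem.Str.join " " acc.1),
   ("patient", PySem.Str.join " " acc.2),
   ("full", transcript)]

-- ===== PORT B =====
def split_by_speaker_alt (transcript : String) : List (String × String) :=
  let lines := (PySem.Str.split? transcript "\n").getD []
  -- 'for line in reversed(lines)' = a left fold over lines.reverse
  let acc := lines.reverse.foldl
    (fun (acc : Option String × Option String) line =>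
      if PySem.Str.startswith line "Doctor:" then
        let s := PySem.Str.strip (PySem.Str.replace line "Doctor:" "")
        ((match acc.1 with
          | none => some s
          | some t => some (s ++ " " ++ t)), acc.2)
      else if PySem.Str.startswith line "Patient:" then
        let s := PySem.Str.strip (PySem.Str.replace line "Patient:" "")
        (acc.1,
         (match acc.2 with
          | none => some s
          | some t => some (s ++ " " ++ t)))
      else acc)
    (none, none)
  [("doctor", (match acc.1 with | none => "" | some d => d)),
   ("patient", (match acc.2 with | none => "" | some p => p)),
   ("full", transcript)]

-- ===== PRECONDITION & SPEC =====
def Spec_split_by_speaker (transcript : String) (out : List (String × String)) : Prop := out = split_by_speaker_alt transcript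
instance (transcript : String) (out : List (String × String)) : Decidable (Spec_split_by_speaker transcript out) := by unfold Spec_split_by_speaker; infer_instance

-- ===== CLAIM (what is proved, stated in full; the proofs are below) =====
def Claim_equal_split_by_speaker : Prop := ∀ (transcript : String), Dom_split_by_speaker transcript → Spec_split_by_speaker transcript (split_by_speaker transcript)

-- ===== LEMMAS AND PROOFS =====

-- A line cannot start with both "Doctor:" and "Patient:" (its first character differs).
theorem not_both_prefixes (l : String)
    (hd : PySem.Str.startswith l "Doctor:" = true) :
    PySem.Str.startswith l "Patient:" = false := by
  by_contra h
  rw [Bool.not_eq_false] at h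
  rw [PySem.Str.startswith_eq, PySem.Chars.startswith_iff] at hd h
  obtain ⟨t1, h1⟩ := hd
  obtain ⟨t2, h2⟩ := h
  rw [← h1] at h2
  have := congrArg (fun xs => xs.head?) h2
  simp at this

-- A's fold with both list accumulators equals two independent filter-map passes.
theorem fold_eq_filters (lines : List String) (d p : List String) :
    lines.foldl
      (fun (acc : List String × List String) line =>
        if PySem.Str.startswith line "Doctor:" then
          (acc.1 ++ [PySem.Str.strip (PySem.Str.replace line "Doctor:" "")], acc.2)
        else if PySem.Str.startswith line "Patient:" then
          (acc.1, acc.2 ++ [PySem.Str.strip (PySem.Str.replace line "Patient:" "")])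
        else acc)
      (d, p)
    = (d ++ (lines.filter (fun l => PySem.Str.startswith l "Doctor:")).map
          (fun l => PySem.Str.strip (PySem.Str.replace l "Doctor:" "")),
       p ++ (lines.filter (fun l => PySem.Str.startswith l "Patient:")).map
          (fun l => PySem.Str.strip (PySem.Str.replace l "Patient:" ""))) := by
  induction lines generalizing d p with
  | nil => simp
  | cons line rest ih =>
    by_cases hd : PySem.Str.startswith line "Doctor:" = true
    · have hp := not_both_prefixes line hd
      simp only [PySem.Str.startswith_eq] at ih hd hp ⊢
      simp only [List.foldl_cons, List.filter_cons, hd, hp, if_true, Bool.false_eq_true,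
        if_false, ih, List.map_cons]
      simp
    · by_cases hp : PySem.Str.startswith line "Patient:" = true
      · simp only [PySem.Str.startswith_eq] at ih hd hp ⊢
        rw [Bool.not_eq_true] at hd
        simp only [List.foldl_cons, List.filter_cons, hd, hp, if_true, Bool.false_eq_true,
          if_false, ih, List.map_cons]
        simp
      · simp only [PySem.Str.startswith_eq] at ih hd hp ⊢
        rw [Bool.not_eq_true] at hd hp
        simp only [List.foldl_cons, List.filter_cons, hd, hp, Bool.false_eq_true,
          if_false, ih]

-- Proof-side helper: the joined string of a (possibly empty) piece list, as an Option.
def optJoin (xs : List String) : Option String :=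
  match xs with
  | [] => none
  | _ => some (PySem.Str.join " " xs)

theorem strJoin_cons_cons (a b : String) (xs : List String) :
    PySem.Str.join " " (a :: b :: xs) = a ++ " " ++ PySem.Str.join " " (b :: xs) := by
  unfold PySem.Str.join
  simp [PySem.Chars.join_cons_cons]
  rw [show (' ' :: PySem.Chars.join [' '] (b.toList :: List.map String.toList xs))
      = [' '] ++ PySem.Chars.join [' '] (b.toList :: List.map String.toList xs) from rfl,
    String.ofList_append, String.append_assoc]

theorem optJoin_combine (s : String) (xs : List String) :
    (match optJoin xs with
      | none => some s
      | some t => some (s ++ " " ++ t)) = optJoin (s :: xs) := by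
  match xs with
  | [] => simp [optJoin, PySem.Str.join]
  | b :: rest => simp [optJoin, strJoin_cons_cons]

-- B's back-to-front fold equals the optJoin of the two filter-map piece lists.
theorem rev_fold_eq_optJoin (lines : List String) :
    lines.reverse.foldl
      (fun (acc : Option String × Option String) line =>
        if PySem.Str.startswith line "Doctor:" then
          let s := PySem.Str.strip (PySem.Str.replace line "Doctor:" "")
          ((match acc.1 with
            | none => some s
            | some t => some (s ++ " " ++ t)), acc.2)
        else if PySem.Str.startswith line "Patient:" then
          let s := PySem.Str.strip (PySem.Str.replace line "Patient:" "")
          (acc.1,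
           (match acc.2 with
            | none => some s
            | some t => some (s ++ " " ++ t)))
        else acc)
      (none, none)
    = (optJoin ((lines.filter (fun l => PySem.Str.startswith l "Doctor:")).map
          (fun l => PySem.Str.strip (PySem.Str.replace l "Doctor:" ""))),
       optJoin ((lines.filter (fun l => PySem.Str.startswith l "Patient:")).map
          (fun l => PySem.Str.strip (PySem.Str.replace l "Patient:" "")))) := by
  rw [List.foldl_reverse]
  induction lines with
  | nil => simp [optJoin]
  | cons line rest ih =>
    rw [List.foldr_cons, ih]
    by_cases hd : PySem.Str.startswith line "Doctor:" = true
    · have hp := not_both_prefixes line hd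
      simp only [List.filter_cons, hd, hp, if_true, Bool.false_eq_true, if_false,
        List.map_cons, optJoin_combine]
    · by_cases hp : PySem.Str.startswith line "Patient:" = true
      · rw [Bool.not_eq_true] at hd
        simp only [List.filter_cons, hd, hp, if_true, Bool.false_eq_true, if_false,
          List.map_cons, optJoin_combine]
      · rw [Bool.not_eq_true] at hd hp
        simp only [List.filter_cons, hd, hp, Bool.false_eq_true, if_false]

theorem optJoin_getD (xs : List String) :
    (match optJoin xs with | none => "" | some d => d) = PySem.Str.join " " xs := by
  match xs with
  | [] => simp [optJoin, PySem.Str.join]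
  | b :: rest => simp [optJoin]

-- ===== VERDICT (by name: the statement is the Claim_ definition above) =====
theorem split_by_speaker_spec : Claim_equal_split_by_speaker := by
  intro transcript _
  unfold Spec_split_by_speaker split_by_speaker split_by_speaker_alt
  simp only [fold_eq_filters, rev_fold_eq_optJoin, optJoin_getD, List.nil_append]
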